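-- pv_equiv track=rewrite | github.com/pypi-data/pypi-mirror-401 | packages/molass-legacy/molass_legacy-0.5.1-py3-none-any.whl/molass_legacy/KekLib/BasicUtils.py | make_indecies_text
-- ===== SOURCE A (Python) =====
-- def make_indecies_text( indecies, offset=0 ):
--     assert( len( indecies ) > 0 )
--     previous = None
--     is_continuous = True
--     for i in indecies:
--         if previous is not None:
--             if i != previous + 1:
--                 is_continuous = False
--         previous = i
--
--     if is_continuous:
--         if len( indecies ) == 1:
--             text = str( offset+indecies[0] )
--         else:
--             text = '%d-%d' % ( offset+indecies[0], offset+indecies[-1] )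
--     else:
--         text = ','.join( [ str(offset+i) for i in indecies ] )
--
--     return text
-- ===== SOURCE B (Python) =====
-- def make_indecies_text(indecies, offset=0):
--     # Compress the indices into maximal consecutive runs (lo, hi); a single run
--     # means the whole list is one ascending consecutive block.
--     runs = []
--     lo = hi = indecies[0]
--     for i in indecies[1:]:
--         if i == hi + 1:
--             hi = i
--         else:
--             runs.append((lo, hi))
--             lo = hi = i
--     runs.append((lo, hi))
--     if len(runs) == 1:
--         lo, hi = runs[0]
--         text = str(offset + lo) if lo == hi else '%d-%d' % (offset + lo, offset + hi)
--     else: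
--         text = ','.join(str(offset + i) for i in indecies)
--     return text
-- ===== Notes on version B (the rewrite author's own statement) =====
-- stated objective: alternative
-- what changed: B compresses the indices into maximal consecutive runs (lo,hi) in one pass and formats from the run list (one run with lo==hi -> str, one run -> 'lo-hi', several runs -> comma join), instead of A's previous/is_continuous flag loop followed by indexing the original list.
import Mathlib
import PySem

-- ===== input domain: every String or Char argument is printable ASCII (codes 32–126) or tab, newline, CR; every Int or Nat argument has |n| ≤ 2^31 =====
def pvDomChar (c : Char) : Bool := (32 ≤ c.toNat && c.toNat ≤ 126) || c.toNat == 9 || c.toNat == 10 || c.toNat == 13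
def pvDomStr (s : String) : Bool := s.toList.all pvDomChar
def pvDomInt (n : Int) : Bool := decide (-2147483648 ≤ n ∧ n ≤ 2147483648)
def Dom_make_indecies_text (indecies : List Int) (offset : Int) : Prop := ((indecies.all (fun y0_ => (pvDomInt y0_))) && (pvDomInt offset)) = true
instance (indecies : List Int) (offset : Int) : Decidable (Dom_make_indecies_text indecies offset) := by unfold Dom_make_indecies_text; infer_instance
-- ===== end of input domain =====

-- B replaces A's previous/is_continuous flag loop by one pass compressing the list into
-- maximal consecutive runs and formatting from the run list: alternative decomposition.
-- ===== PORT A =====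
-- the for-loop over indecies carrying (previous, is_continuous)
def pvStepA (s : Option Int × Bool) (i : Int) : Option Int × Bool :=
  (some i, match s.1 with
           | none => s.2
           | some p => if i ≠ p + 1 then false else s.2)

def make_indecies_text (indecies : List Int) (offset : Int) : String :=
  let st := indecies.foldl pvStepA (none, true)
  if st.2 then
    if indecies.length = 1 then
      PySem.Int.toStr (offset + (PySem.List.pyGet? indecies 0).getD 0)
    else
      PySem.Int.toStr (offset + (PySem.List.pyGet? indecies 0).getD 0) ++ "-" ++
        PySem.Int.toStr (offset + (PySem.List.pyGet? indecies (-1)).getD 0)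
  else
    PySem.Str.join "," (indecies.map (fun i => PySem.Int.toStr (offset + i)))

-- ===== PORT B =====
-- the for-loop over indecies[1:] carrying (runs, lo, hi)
def pvStepB (s : List (Int × Int) × Int × Int) (i : Int) : List (Int × Int) × Int × Int :=
  if i = s.2.2 + 1 then (s.1, s.2.1, i) else (s.1 ++ [(s.2.1, s.2.2)], i, i)

def make_indecies_text_alt (indecies : List Int) (offset : Int) : String :=
  match PySem.List.pyGet? indecies 0 with
  | none => ""   -- unreachable under Pre_ (indecies[0] raises IndexError on [])
  | some x =>
    let s := (PySem.List.slice indecies (some 1) none).foldl pvStepB ([], x, x)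
    let runs := s.1 ++ [(s.2.1, s.2.2)]
    if runs.length = 1 then
      let lo := (runs.headD (0, 0)).1
      let hi := (runs.headD (0, 0)).2
      if lo = hi then PySem.Int.toStr (offset + lo)
      else PySem.Int.toStr (offset + lo) ++ "-" ++ PySem.Int.toStr (offset + hi)
    else
      PySem.Str.join "," (indecies.map (fun i => PySem.Int.toStr (offset + i)))

-- ===== PRECONDITION & SPEC =====
-- A asserts len(indecies) > 0 (AssertionError on []); B raises IndexError there too.
def Pre_make_indecies_text (indecies : List Int) (offset : Int) : Prop := indecies ≠ []
instance (indecies : List Int) (offset : Int) : Decidable (Pre_make_indecies_text indecies offset) := by unfold Pre_make_indecies_text; infer_instance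
def pvWitness_make_indecies_text : List Int × Int := ([3, 4, 5], 10)

def Spec_make_indecies_text (indecies : List Int) (offset : Int) (out : String) : Prop := out = make_indecies_text_alt indecies offset
instance (indecies : List Int) (offset : Int) (out : String) : Decidable (Spec_make_indecies_text indecies offset out) := by unfold Spec_make_indecies_text; infer_instance

-- ===== CLAIM =====
def Claim_equal_make_indecies_text : Prop := ∀ (indecies : List Int) (offset : Int), Dom_make_indecies_text indecies offset → Pre_make_indecies_text indecies offset → Spec_make_indecies_text indecies offset (make_indecies_text indecies offset)

-- ===== LEMMAS AND PROOFS =====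

-- A's flag, started after a first element with previous = p, is true iff the rest is the run p+1, p+2, …
theorem pvFlagA_eq (xs : List Int) (p : Int) (b : Bool) :
    (xs.foldl pvStepA (some p, b)).2
      = (b && decide (xs = PySem.List.pyRange (p + 1) (p + 1 + xs.length) 1)) := by
  induction xs generalizing p b with
  | nil =>
    simp [PySem.List.pyRange_one_eq_nil]
  | cons x xs ih =>
    simp only [List.foldl_cons, pvStepA]
    rw [ih]
    have hb : (p:Int) + 1 + ((x :: xs).length : Int) = (p + 1) + (xs.length : Int) + 1 := by
      push_cast [List.length_cons]; ring
    rw [hb, PySem.List.pyRange_one_cons (show (p:Int) + 1 < (p + 1) + (xs.length : Int) + 1 by omega)]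
    by_cases hx : x = p + 1
    · subst hx
      rw [if_neg (by simp)]
      have h2 : (p:Int) + 1 + (xs.length : Int) + 1 = (p + 1) + 1 + (xs.length : Int) := by ring
      rw [h2]
      simp
    · rw [if_pos hx]
      simp [hx]

-- B's fold never shortens the runs list
theorem pvRunsB_mono (xs : List Int) (rs : List (Int × Int)) (lo hi : Int) :
    rs.length ≤ (xs.foldl pvStepB (rs, lo, hi)).1.length := by
  induction xs generalizing rs lo hi with
  | nil => simp
  | cons x xs ih =>
    simp only [List.foldl_cons, pvStepB]
    by_cases hx : x = hi + 1
    · rw [if_pos hx]; exact ih rs lo x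
    · rw [if_neg hx]
      calc rs.length ≤ (rs ++ [(lo, hi)]).length := by simp
        _ ≤ _ := ih _ x x

-- if the remaining elements continue the current run, B's fold just extends hi
theorem pvRunsB_contig (xs : List Int) (rs : List (Int × Int)) (lo hi : Int)
    (h : xs = PySem.List.pyRange (hi + 1) (hi + 1 + xs.length) 1) :
    xs.foldl pvStepB (rs, lo, hi) = (rs, lo, hi + xs.length) := by
  induction xs generalizing rs lo hi with
  | nil => simp
  | cons x xs ih =>
    have hb : (hi:Int) + 1 + ((x :: xs).length : Int) = (hi + 1) + (xs.length : Int) + 1 := by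
      push_cast [List.length_cons]; ring
    rw [hb, PySem.List.pyRange_one_cons (show (hi:Int) + 1 < (hi + 1) + (xs.length : Int) + 1 by omega)] at h
    have e : (hi:Int) + 1 + (xs.length : Int) + 1 = (hi + 1) + 1 + (xs.length : Int) := by ring
    rw [e] at h
    obtain ⟨hx, hxs⟩ := List.cons_eq_cons.mp h
    subst hx
    simp only [List.foldl_cons, pvStepB, if_pos]
    rw [ih rs lo (hi + 1) hxs]
    simp only [Prod.mk.injEq]
    refine ⟨trivial, trivial, ?_⟩
    push_cast [List.length_cons]; ring

-- if they do not, B's fold strictly grows the runs list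
theorem pvRunsB_break (xs : List Int) (rs : List (Int × Int)) (lo hi : Int)
    (h : xs ≠ PySem.List.pyRange (hi + 1) (hi + 1 + xs.length) 1) :
    rs.length < (xs.foldl pvStepB (rs, lo, hi)).1.length := by
  induction xs generalizing rs lo hi with
  | nil => exact absurd (by simp [PySem.List.pyRange_one_eq_nil]) h
  | cons x xs ih =>
    have hb : (hi:Int) + 1 + ((x :: xs).length : Int) = (hi + 1) + (xs.length : Int) + 1 := by
      push_cast [List.length_cons]; ring
    rw [hb, PySem.List.pyRange_one_cons (show (hi:Int) + 1 < (hi + 1) + (xs.length : Int) + 1 by omega)] at h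
    have e : (hi:Int) + 1 + (xs.length : Int) + 1 = (hi + 1) + 1 + (xs.length : Int) := by ring
    rw [e] at h
    simp only [List.foldl_cons, pvStepB]
    by_cases hx : x = hi + 1
    · subst hx
      simp only [if_pos]
      have hxs : xs ≠ PySem.List.pyRange (hi + 1 + 1) (hi + 1 + 1 + xs.length) 1 := by
        intro hc; exact h (by rw [← hc])
      exact ih rs lo (hi + 1) hxs
    · rw [if_neg hx]
      calc rs.length < (rs ++ [(lo, hi)]).length := by simp
        _ ≤ _ := pvRunsB_mono _ _ _ _

-- the last element of a full consecutive run
theorem pvLast_contig (x : Int) (xs : List Int)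
    (h : xs = PySem.List.pyRange (x + 1) (x + 1 + xs.length) 1) :
    (x :: xs).getLast? = some (x + xs.length) := by
  have e : (x:Int) + 1 + (xs.length : Int) = x + (xs.length : Int) + 1 := by ring
  rw [e] at h
  have hall : x :: xs = PySem.List.pyRange x (x + xs.length + 1) 1 := by
    rw [PySem.List.pyRange_one_cons (show (x:Int) < x + xs.length + 1 by omega), ← h]
  rw [hall, PySem.List.pyRange_one_succ_right (show (x:Int) ≤ x + xs.length by omega)]
  simp

-- ===== VERDICT =====
theorem make_indecies_text_spec : Claim_equal_make_indecies_text := by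
  intro indecies offset _ hpre
  unfold Spec_make_indecies_text
  match indecies with
  | [] => exact absurd rfl hpre
  | x :: xs =>
    unfold make_indecies_text make_indecies_text_alt
    simp only [PySem.List.pyGet?_zero_cons, Option.getD_some, PySem.List.slice_from_one,
      List.tail_cons, List.foldl_cons, pvStepA]
    rw [pvFlagA_eq]
    by_cases hc : xs = PySem.List.pyRange (x + 1) (x + 1 + (xs.length : Int)) 1
    · rw [pvRunsB_contig xs [] x x hc]
      rw [if_pos (show (true && decide (xs = PySem.List.pyRange (x + 1) (x + 1 + (xs.length : Int)) 1)) = true by simp only [Bool.true_and, decide_eq_true_eq]; exact hc)]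
      simp only [List.nil_append, List.length_singleton, List.headD_cons, if_true]
      by_cases h1 : xs = []
      · subst h1
        simp
      · have hne : ¬ (x :: xs).length = 1 := by
          simp only [List.length_cons, Nat.add_eq_right, List.length_eq_zero_iff]
          exact h1
        rw [if_neg hne]
        have hlp : xs.length ≠ 0 := by
          simpa only [ne_eq, List.length_eq_zero_iff] using h1
        rw [if_neg (show ¬ (x : Int) = x + (xs.length : Int) by omega)]
        rw [PySem.List.pyGet?_neg_one, pvLast_contig x xs hc]
        rfl
    · rw [if_neg (by simpa using hc)]
      have hbrk := pvRunsB_break xs [] x x hc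
      rw [if_neg (by
        intro hlen
        simp only [List.length_append, List.length_singleton, List.length_nil] at hlen hbrk
        omega)]
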